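-- pv_equiv track=rewrite | github.com/Giacomod2001/datamining | ml_utils.py | _interpret_topic_keywords
-- ===== SOURCE A (Python) =====
-- from typing import Set, Dict, Tuple, List
--
-- def _interpret_topic_keywords(keywords: List[str]) -> str:
--     """
--     INTERPRETAZIONE PAROLE CHIAVE TOPIC
--     ====================================
--     Converte una lista di keyword in un'interpretazione leggibile.
--     """
--
--     # Format keywords for display (Title Case)
--     def format_kw(k):
--         # Handle compound names with underscores
--         if '_' in k:
--             return k.replace('_', ' ').title()
--         return k.title()
--
--     kw_display = [format_kw(k) for k in keywords[:3]]
--     kw_lower = {k.lower().replace(' ', '_') for k in keywords}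
--
--     # Pattern di tecnologie per categoria (including compound names)
--     analytics_tools = {'google_analytics', 'google_analytics_4', 'tag_manager', 'google_tag_manager', 'tracking', 'ga4'}
--     viz_tech = {'tableau', 'power_bi', 'looker_studio', 'data_studio', 'visualization', 'dashboard', 'looker', 'data_visualization'}
--     cloud_tech = {'aws', 'azure', 'gcp', 'cloud', 'kubernetes', 'docker', 'google_cloud'}
--     data_tech = {'data', 'sql', 'database', 'etl', 'pipeline', 'warehouse', 'bigquery', 'data_analysis'}
--     ml_ai = {'machine_learning', 'deep_learning', 'ai', 'model', 'neural', 'nlp', 'scikit', 'data_science', 'machine', 'learning'}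
--     marketing = {'marketing', 'seo', 'sem', 'social_media', 'digital_marketing', 'campaign', 'advertising', 'search'}
--     programming = {'python', 'sql', 'r', 'javascript', 'programming', 'coding', 'excel'}
--     business = {'business', 'strategy', 'sales', 'customer', 'revenue', 'roi', 'kpi', 'stakeholder'}
--
--     # Determina la categoria principale
--     if kw_lower & analytics_tools:
--         return f"Web Analytics & Tracking: Working with {', '.join(kw_display)}"
--
--     elif kw_lower & viz_tech:
--         return f"Data Visualization & BI: Creating dashboards with {', '.join(kw_display)}"
--
--     elif kw_lower & ml_ai:
--         return f"Machine Learning & AI: Building models with {', '.join(kw_display)}"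
--
--     elif kw_lower & cloud_tech:
--         return f"Cloud & Infrastructure: Managing {', '.join(kw_display)}"
--
--     elif kw_lower & marketing:
--         return f"Digital Marketing: Driving growth with {', '.join(kw_display)}"
--
--     elif kw_lower & programming:
--         return f"Technical Skills: Programming with {', '.join(kw_display)}"
--
--     elif kw_lower & data_tech:
--         return f"Data Engineering: Working with {', '.join(kw_display)}"
--
--     elif kw_lower & business:
--         return f"Business Skills: Focus on {', '.join(kw_display)}"
--
--     else:
--         return f"Key Focus: {', '.join(kw_display)}"
-- ===== SOURCE B (Python) =====
-- def _interpret_topic_keywords(keywords):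
--     # Format keywords for display (Title Case) -- unchanged display logic
--     def format_kw(k):
--         if '_' in k:
--             return k.replace('_', ' ').title()
--         return k.title()
--
--     disp = ', '.join(format_kw(k) for k in keywords[:3])
--
--     cats = [
--         (['google_analytics', 'google_analytics_4', 'tag_manager', 'google_tag_manager', 'tracking', 'ga4'],
--          f"Web Analytics & Tracking: Working with {disp}"),
--         (['tableau', 'power_bi', 'looker_studio', 'data_studio', 'visualization', 'dashboard', 'looker', 'data_visualization'],
--          f"Data Visualization & BI: Creating dashboards with {disp}"),
--         (['machine_learning', 'deep_learning', 'ai', 'model', 'neural', 'nlp', 'scikit', 'data_science', 'machine', 'learning'],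
--          f"Machine Learning & AI: Building models with {disp}"),
--         (['aws', 'azure', 'gcp', 'cloud', 'kubernetes', 'docker', 'google_cloud'],
--          f"Cloud & Infrastructure: Managing {disp}"),
--         (['marketing', 'seo', 'sem', 'social_media', 'digital_marketing', 'campaign', 'advertising', 'search'],
--          f"Digital Marketing: Driving growth with {disp}"),
--         (['python', 'sql', 'r', 'javascript', 'programming', 'coding', 'excel'],
--          f"Technical Skills: Programming with {disp}"),
--         (['data', 'sql', 'database', 'etl', 'pipeline', 'warehouse', 'bigquery', 'data_analysis'],
--          f"Data Engineering: Working with {disp}"),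
--         (['business', 'strategy', 'sales', 'customer', 'revenue', 'roi', 'kpi', 'stakeholder'],
--          f"Business Skills: Focus on {disp}"),
--     ]
--
--     # Inverted index: keyword -> rank of its highest-priority category
--     # (setdefault keeps the first, i.e. highest-priority, assignment).
--     rank = {}
--     for i, (kws, _) in enumerate(cats):
--         for kw in kws:
--             rank.setdefault(kw, i)
--
--     best = None
--     for k in keywords:
--         r = rank.get(k.lower().replace(' ', '_'))
--         if r is not None and (best is None or r < best):
--             best = r
--
--     if best is None:
--         return f"Key Focus: {disp}"
--     return cats[best][1]
-- ===== Notes on version B (the rewrite author's own statement) =====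
-- stated objective: alternative
-- what changed: Replaces A's eight hand-written set-intersection elif branches by an inverted keyword-to-rank dict built once with setdefault (first, highest-priority assignment wins) plus a single min-rank scan over the normalized input keywords that selects the category template.
import Mathlib
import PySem

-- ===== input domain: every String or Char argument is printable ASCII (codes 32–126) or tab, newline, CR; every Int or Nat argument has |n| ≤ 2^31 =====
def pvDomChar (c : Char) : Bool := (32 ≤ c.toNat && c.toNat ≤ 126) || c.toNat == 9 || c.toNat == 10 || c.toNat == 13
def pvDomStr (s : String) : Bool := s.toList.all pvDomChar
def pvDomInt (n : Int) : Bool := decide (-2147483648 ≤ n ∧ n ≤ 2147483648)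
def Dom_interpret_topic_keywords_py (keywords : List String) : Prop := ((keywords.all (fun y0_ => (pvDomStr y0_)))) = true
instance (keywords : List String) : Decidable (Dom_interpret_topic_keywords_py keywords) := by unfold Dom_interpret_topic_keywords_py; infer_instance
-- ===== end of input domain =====

-- B replaces A's eight hand-written set-intersection branches by an inverted keyword→rank
-- dict built once (setdefault keeps the highest-priority rank) and a single min-rank scan
-- over the input keywords; objective: alternative (different data structure, same cost).

-- ===== PORT A =====
-- hand port of str.title() (no PySem primitive); exact on the printable-ASCII domain,
-- where Python's 'cased' coincides with isalpha
def pyTitleChars : List Char → Bool → List Char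
  | [], _ => []
  | c :: cs, prev =>
    (if PySem.Chars.isalpha c then
       (if prev then PySem.Chars.lowerChar c else PySem.Chars.upperChar c)
     else c) :: pyTitleChars cs (PySem.Chars.isalpha c)

def pyTitle (s : String) : String := String.ofList (pyTitleChars s.toList false)

-- format_kw is the same nested helper in A and in B (B keeps the display logic unchanged)
def format_kw (k : String) : String :=
  if PySem.Str.isIn "_" k then pyTitle (PySem.Str.replace k "_" " ") else pyTitle k

def interpret_topic_keywords_py (keywords : List String) : String :=
  let kw_display := (PySem.List.slice keywords none (some 3)).map format_kw
  let kw_lower : PySem.Set String :=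
    PySem.Set.ofList (keywords.map (fun k => PySem.Str.replace (PySem.Str.lower k) " " "_"))
  let analytics_tools : PySem.Set String := PySem.Set.ofList
    ["google_analytics", "google_analytics_4", "tag_manager", "google_tag_manager", "tracking", "ga4"]
  let viz_tech : PySem.Set String := PySem.Set.ofList
    ["tableau", "power_bi", "looker_studio", "data_studio", "visualization", "dashboard", "looker", "data_visualization"]
  let cloud_tech : PySem.Set String := PySem.Set.ofList
    ["aws", "azure", "gcp", "cloud", "kubernetes", "docker", "google_cloud"]
  let data_tech : PySem.Set String := PySem.Set.ofList
    ["data", "sql", "database", "etl", "pipeline", "warehouse", "bigquery", "data_analysis"]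
  let ml_ai : PySem.Set String := PySem.Set.ofList
    ["machine_learning", "deep_learning", "ai", "model", "neural", "nlp", "scikit", "data_science", "machine", "learning"]
  let marketing : PySem.Set String := PySem.Set.ofList
    ["marketing", "seo", "sem", "social_media", "digital_marketing", "campaign", "advertising", "search"]
  let programming : PySem.Set String := PySem.Set.ofList
    ["python", "sql", "r", "javascript", "programming", "coding", "excel"]
  let business : PySem.Set String := PySem.Set.ofList
    ["business", "strategy", "sales", "customer", "revenue", "roi", "kpi", "stakeholder"]
  if PySem.Set.inter kw_lower analytics_tools ≠ [] then
    "Web Analytics & Tracking: Working with " ++ PySem.Str.join ", " kw_display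
  else if PySem.Set.inter kw_lower viz_tech ≠ [] then
    "Data Visualization & BI: Creating dashboards with " ++ PySem.Str.join ", " kw_display
  else if PySem.Set.inter kw_lower ml_ai ≠ [] then
    "Machine Learning & AI: Building models with " ++ PySem.Str.join ", " kw_display
  else if PySem.Set.inter kw_lower cloud_tech ≠ [] then
    "Cloud & Infrastructure: Managing " ++ PySem.Str.join ", " kw_display
  else if PySem.Set.inter kw_lower marketing ≠ [] then
    "Digital Marketing: Driving growth with " ++ PySem.Str.join ", " kw_display
  else if PySem.Set.inter kw_lower programming ≠ [] then
    "Technical Skills: Programming with " ++ PySem.Str.join ", " kw_display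
  else if PySem.Set.inter kw_lower data_tech ≠ [] then
    "Data Engineering: Working with " ++ PySem.Str.join ", " kw_display
  else if PySem.Set.inter kw_lower business ≠ [] then
    "Business Skills: Focus on " ++ PySem.Str.join ", " kw_display
  else
    "Key Focus: " ++ PySem.Str.join ", " kw_display

-- ===== PORT B =====
def interpret_topic_keywords_py_alt (keywords : List String) : String :=
  let disp := PySem.Str.join ", " ((PySem.List.slice keywords none (some 3)).map format_kw)
  let cats : List (List String × String) :=
    [ (["google_analytics", "google_analytics_4", "tag_manager", "google_tag_manager", "tracking", "ga4"],
       "Web Analytics & Tracking: Working with " ++ disp),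
      (["tableau", "power_bi", "looker_studio", "data_studio", "visualization", "dashboard", "looker", "data_visualization"],
       "Data Visualization & BI: Creating dashboards with " ++ disp),
      (["machine_learning", "deep_learning", "ai", "model", "neural", "nlp", "scikit", "data_science", "machine", "learning"],
       "Machine Learning & AI: Building models with " ++ disp),
      (["aws", "azure", "gcp", "cloud", "kubernetes", "docker", "google_cloud"],
       "Cloud & Infrastructure: Managing " ++ disp),
      (["marketing", "seo", "sem", "social_media", "digital_marketing", "campaign", "advertising", "search"],
       "Digital Marketing: Driving growth with " ++ disp),
      (["python", "sql", "r", "javascript", "programming", "coding", "excel"],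
       "Technical Skills: Programming with " ++ disp),
      (["data", "sql", "database", "etl", "pipeline", "warehouse", "bigquery", "data_analysis"],
       "Data Engineering: Working with " ++ disp),
      (["business", "strategy", "sales", "customer", "revenue", "roi", "kpi", "stakeholder"],
       "Business Skills: Focus on " ++ disp) ]
  let rank : PySem.Dict String Int :=
    (PySem.List.enumerate cats 0).foldl
      (fun d p => p.2.1.foldl (fun d kw => d.setdefault kw p.1) d) PySem.Dict.empty
  let best : Option Int :=
    keywords.foldl
      (fun best k =>
        match rank.get? (PySem.Str.replace (PySem.Str.lower k) " " "_") with
        | some r => match best with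
                    | none => some r
                    | some b => if r < b then some r else some b
        | none => best) none
  match best with
  | none => "Key Focus: " ++ disp
  | some b => (PySem.List.pyGetD cats b ([], "")).2

-- ===== PRECONDITION & SPEC =====
def Spec_interpret_topic_keywords_py (keywords : List String) (out : String) : Prop := out = interpret_topic_keywords_py_alt keywords
instance (keywords : List String) (out : String) : Decidable (Spec_interpret_topic_keywords_py keywords out) := by unfold Spec_interpret_topic_keywords_py; infer_instance

-- ===== CLAIM (what is proved, stated in full; the proofs are below) =====
def Claim_equal_interpret_topic_keywords_py : Prop := ∀ (keywords : List String), Dom_interpret_topic_keywords_py keywords → Spec_interpret_topic_keywords_py keywords (interpret_topic_keywords_py keywords)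

-- ===== LEMMAS AND PROOFS =====

-- normalization applied to every keyword (k.lower().replace(' ', '_'))
def pvNrm (k : String) : String := PySem.Str.replace (PySem.Str.lower k) " " "_"

-- the accumulator step of B's min-rank scan
def pvStep (g : String → Option Int) (acc : Option Int) (k : String) : Option Int :=
  match g k with
  | some r => match acc with
              | none => some r
              | some b => if r < b then some r else some b
  | none => acc

-- the common normal form of both programs: first category containing a normalized keyword
def pvChain (ms : List String) : List (List String × String) → String → String
  | [], fb => fb
  | c :: rest, fb => if ∃ k ∈ ms, pvNrm k ∈ c.1 then c.2 else pvChain ms rest fb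

theorem pv_get?_fold_setdefault (l : List String) (v : Int) (d : PySem.Dict String Int) (s : String) :
    (l.foldl (fun d kw => d.setdefault kw v) d).get? s =
      if d.contains s then d.get? s else if s ∈ l then some v else none := by
  induction l generalizing d with
  | nil =>
      by_cases h : d.contains s = true
      · simp [h]
      · simp [h, (PySem.Dict.get?_eq_none_iff_contains d s).2 (by simpa using h)]
  | cons kw l ih =>
      simp only [List.foldl_cons]
      rw [ih]
      by_cases hs : s = kw
      · subst hs
        rw [PySem.Dict.contains_setdefault]
        simp only [BEq.rfl, Bool.true_or, if_true]
        rw [PySem.Dict.get?_setdefault_self]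
        by_cases h : d.contains s = true
        · cases hg : d.get? s with
          | none => exact absurd ((PySem.Dict.get?_eq_none_iff_contains d s).1 hg) (by simp [h])
          | some w => simp [h, hg]
        · have hg : d.get? s = none := (PySem.Dict.get?_eq_none_iff_contains d s).2 (by simpa using h)
          simp [h, hg]
      · rw [PySem.Dict.get?_setdefault_of_ne d v hs, PySem.Dict.contains_setdefault]
        have hb : (s == kw) = false := by simpa using hs
        simp [hb, hs]

theorem pv_contains_fold_setdefault (l : List String) (v : Int) (d : PySem.Dict String Int) (s : String) :
    (l.foldl (fun d kw => d.setdefault kw v) d).contains s = (d.contains s || decide (s ∈ l)) := by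
  rw [PySem.Dict.contains_eq_isSome_get?, pv_get?_fold_setdefault]
  by_cases h : d.contains s = true
  · rw [if_pos h, ← PySem.Dict.contains_eq_isSome_get?]
    simp [h]
  · by_cases hm : s ∈ l <;> simp [h, hm]

theorem pv_get?_rank (cats0 : List (List String × String)) (i0 : Int)
    (d : PySem.Dict String Int) (s : String) :
    ((PySem.List.enumerate cats0 i0).foldl
        (fun d p => p.2.1.foldl (fun d kw => d.setdefault kw p.1) d) d).get? s =
      if d.contains s then d.get? s
      else Option.map (fun j => i0 + Int.ofNat j) (List.findIdx? (fun c => c.1.contains s) cats0) := by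
  induction cats0 generalizing i0 d with
  | nil =>
      by_cases h : d.contains s = true
      · simp [PySem.List.enumerate, h]
      · simp [PySem.List.enumerate, h, (PySem.Dict.get?_eq_none_iff_contains d s).2 (by simpa using h)]
  | cons c rest ih =>
      rw [PySem.List.enumerate_cons]
      simp only [List.foldl_cons]
      rw [ih]
      rw [pv_contains_fold_setdefault, pv_get?_fold_setdefault]
      by_cases h : d.contains s = true
      · simp [h]
      · by_cases hm : s ∈ c.1
        · have hc : (List.findIdx? (fun c => c.1.contains s) (c :: rest)) = some 0 := by
            rw [List.findIdx?_cons]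
            simp [hm]
          rw [hc]
          simp [h, hm]
        · have hc : (List.findIdx? (fun c => c.1.contains s) (c :: rest)) =
              (List.findIdx? (fun c => c.1.contains s) rest).map (fun i => i + 1) := by
            rw [List.findIdx?_cons]
            simp [hm]
          rw [hc]
          simp only [h, hm, decide_false, Bool.or_false, if_false, Bool.false_eq_true]
          cases List.findIdx? (fun c => c.1.contains s) rest with
          | none => simp
          | some j =>
              simp only [Option.map_some, Option.some.injEq, Int.ofNat_eq_natCast]
              push_cast
              ring

theorem pvStep_congr (g g' : String → Option Int) (acc : Option Int) (k : String)
    (h : g k = g' k) : pvStep g acc k = pvStep g' acc k := by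
  unfold pvStep; rw [h]

theorem pv_fold_step_none (g : String → Option Int) (ms : List String) (acc : Option Int)
    (h : ∀ k ∈ ms, g k = none) : ms.foldl (pvStep g) acc = acc := by
  induction ms generalizing acc with
  | nil => rfl
  | cons k ms ih =>
      simp only [List.foldl_cons]
      have hk : pvStep g acc k = acc := by unfold pvStep; rw [h k (by simp)]
      rw [hk]
      exact ih acc (fun k hk => h k (by simp [hk]))

theorem pv_fold_step_zero (g : String → Option Int) (ms : List String)
    (hg : ∀ k ∈ ms, ∀ v, g k = some v → 0 ≤ v) :
    ∀ acc : Option Int, (acc = none ∨ ∃ a, acc = some a ∧ 0 ≤ a) →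
    ((∃ k ∈ ms, g k = some 0) ∨ acc = some 0) →
    ms.foldl (pvStep g) acc = some 0 := by
  induction ms with
  | nil =>
      intro acc hacc h0
      rcases h0 with ⟨k, hk, _⟩ | h
      · cases hk
      · simpa using h
  | cons k ms ih =>
      intro acc hacc h0
      simp only [List.foldl_cons]
      have hgk0 : ∀ v, g k = some v → 0 ≤ v := hg k (by simp)
      have hacc' : pvStep g acc k = none ∨ ∃ a, pvStep g acc k = some a ∧ 0 ≤ a := by
        unfold pvStep
        cases hgk : g k with
        | none => exact hacc
        | some r =>
            have hr := hgk0 r hgk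
            rcases hacc with h | ⟨a, ha, ha0⟩
            · subst h; right; exact ⟨r, rfl, hr⟩
            · subst ha
              by_cases hlt : r < a
              · right; exact ⟨r, by simp [hlt], hr⟩
              · right; exact ⟨a, by simp [hlt], ha0⟩
      refine ih (fun k hk => hg k (by simp [hk])) (pvStep g acc k) hacc' ?_
      rcases h0 with ⟨k', hk', hz⟩ | hz
      · rcases List.mem_cons.1 hk' with rfl | hmem
        · right
          unfold pvStep
          rw [hz]
          rcases hacc with h | ⟨a, ha, ha0⟩
          · subst h; rfl
          · subst ha
            by_cases hlt : (0:Int) < a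
            · simp [hlt]
            · have ha' : a = 0 := le_antisymm (by omega) ha0
              subst ha'; simp
        · left; exact ⟨k', hmem, hz⟩
      · right
        unfold pvStep
        cases hgk : g k with
        | none => exact hz
        | some r =>
            have hr := hgk0 r hgk
            rw [hz]
            have hnr : ¬ r < 0 := by omega
            simp [hnr]

theorem pv_fold_step_shift (g : String → Option Int) (ms : List String) :
    ∀ acc : Option Int,
      ms.foldl (pvStep (fun k => (g k).map (· + 1))) (acc.map (· + 1)) =
        (ms.foldl (pvStep g) acc).map (· + 1) := by
  induction ms with
  | nil => intro acc; rfl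
  | cons k ms ih =>
      intro acc
      simp only [List.foldl_cons]
      have hstep : pvStep (fun k => (g k).map (· + 1)) (acc.map (· + 1)) k =
          (pvStep g acc k).map (· + 1) := by
        cases hgk : g k with
        | none => simp [pvStep, hgk]
        | some r =>
            cases acc with
            | none => simp [pvStep, hgk]
            | some b =>
                by_cases hlt : r < b
                · simp [pvStep, hgk, hlt, show r + 1 < b + 1 by omega]
                · simp [pvStep, hgk, hlt, show ¬ (r + 1 < b + 1) by omega]
      rw [hstep, ih]

theorem pv_minexchange (cats0 : List (List String × String)) (ms : List String) :
    ms.foldl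
        (pvStep (fun s =>
          Option.map Int.ofNat (List.findIdx? (fun c => c.1.contains (pvNrm s)) cats0)))
        none =
      Option.map Int.ofNat
        (List.findIdx? (fun c => ms.any (fun s => c.1.contains (pvNrm s))) cats0) := by
  induction cats0 with
  | nil =>
      simp only [List.findIdx?_nil, Option.map_none]
      exact pv_fold_step_none _ ms none (fun k hk => by simp [List.findIdx?_nil])
  | cons c rest ih =>
      by_cases h : ∃ s ∈ ms, c.1.contains (pvNrm s) = true
      · have hq : (ms.any fun s => c.1.contains (pvNrm s)) = true := by
          simpa [List.any_eq_true] using h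
        rw [List.findIdx?_cons, hq, if_pos rfl]
        refine pv_fold_step_zero _ ms ?_ none (Or.inl rfl) ?_
        · intro k hk v hv
          cases hf : List.findIdx? (fun c => c.1.contains (pvNrm k)) (c :: rest) with
          | none => rw [hf] at hv; cases hv
          | some j =>
              rw [hf] at hv
              simp only [Option.map_some, Option.some.injEq] at hv
              subst hv
              exact Int.ofNat_nonneg j
        · left
          obtain ⟨s, hs, hcs⟩ := h
          refine ⟨s, hs, ?_⟩
          rw [List.findIdx?_cons, hcs, if_pos rfl]
          rfl
      · have hq : (ms.any fun s => c.1.contains (pvNrm s)) = false := by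
          rw [List.any_eq_false]
          intro s hs
          exact fun hh => h ⟨s, hs, hh⟩
        have hstep : ∀ acc : Option Int, ∀ s ∈ ms,
            pvStep (fun s =>
              Option.map Int.ofNat
                (List.findIdx? (fun c => c.1.contains (pvNrm s)) (c :: rest))) acc s =
            pvStep (fun s =>
              (Option.map Int.ofNat
                (List.findIdx? (fun c => c.1.contains (pvNrm s)) rest)).map (· + 1)) acc s := by
          intro acc s hs
          apply pvStep_congr
          have hcs : c.1.contains (pvNrm s) = false := by
            by_cases hh : c.1.contains (pvNrm s) = true
            · exact absurd ⟨s, hs, hh⟩ h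
            · simpa using hh
          rw [List.findIdx?_cons, hcs]
          simp only [Bool.false_eq_true, if_false, Option.map_map]
          cases List.findIdx? (fun c => c.1.contains (pvNrm s)) rest with
          | none => rfl
          | some j =>
              simp only [Option.map_some, Option.some.injEq, Function.comp_apply,
                Int.ofNat_eq_natCast]
              push_cast
              ring
        rw [PySem.List.foldl_congr_mem ms _ _ none (fun acc x hx => hstep acc x hx)]
        rw [show (none : Option Int) = Option.map (· + 1) none from rfl, pv_fold_step_shift, ih]
        rw [List.findIdx?_cons, hq]
        simp only [Bool.false_eq_true, if_false, Option.map_map]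
        cases List.findIdx? (fun c => ms.any fun s => c.1.contains (pvNrm s)) rest with
        | none => rfl
        | some j =>
            simp only [Option.map_some, Option.some.injEq, Function.comp_apply,
              Int.ofNat_eq_natCast]
            push_cast
            ring

theorem pv_match_chain (ms : List String) (cats0 : List (List String × String)) (fb : String) :
    (match Option.map Int.ofNat
        (List.findIdx? (fun c => ms.any (fun s => c.1.contains (pvNrm s))) cats0) with
     | none => fb
     | some b => (PySem.List.pyGetD cats0 b ([], "")).2) = pvChain ms cats0 fb := by
  induction cats0 with
  | nil => simp [List.findIdx?_nil, pvChain]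
  | cons c rest ih =>
      rw [List.findIdx?_cons]
      by_cases hq : (ms.any fun s => c.1.contains (pvNrm s)) = true
      · have hc : ∃ k ∈ ms, pvNrm k ∈ c.1 := by
          simpa [List.any_eq_true] using hq
        rw [hq, if_pos rfl]
        rw [pvChain, if_pos hc]
        have hg : PySem.List.pyGetD (c :: rest) (Int.ofNat 0) (([], "") : List String × String) = c := by
          rw [Int.ofNat_eq_natCast, PySem.List.pyGetD_natCast]
          rfl
        simp only [Option.map_some]
        rw [hg]
      · have hq' : (ms.any fun s => c.1.contains (pvNrm s)) = false := by simpa using hq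
        have hc : ¬ ∃ k ∈ ms, pvNrm k ∈ c.1 := by
          rw [List.any_eq_false] at hq'
          rintro ⟨k, hk, hmem⟩
          exact hq' k hk (by simpa using hmem)
        rw [hq']
        simp only [Bool.false_eq_true, if_false, pvChain]
        rw [if_neg hc, ← ih]
        cases hf : List.findIdx? (fun c => ms.any fun s => c.1.contains (pvNrm s)) rest with
        | none => rfl
        | some j =>
            simp only [Option.map_some]
            have hg : PySem.List.pyGetD (c :: rest) (Int.ofNat (j + 1)) (([], "") : List String × String) =
                PySem.List.pyGetD rest (Int.ofNat j) (([], "") : List String × String) := by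
              rw [Int.ofNat_eq_natCast, Int.ofNat_eq_natCast, PySem.List.pyGetD_natCast,
                PySem.List.pyGetD_natCast]
              rfl
            rw [hg]

theorem pv_inter_ne_nil (xs l : List String) :
    (PySem.Set.inter (PySem.Set.ofList xs) (PySem.Set.ofList l) ≠ []) ↔ ∃ x ∈ xs, x ∈ l := by
  constructor
  · intro h
    obtain ⟨y, hy⟩ := List.exists_mem_of_ne_nil _ h
    have hm := (PySem.Set.mem_inter _ _ y).1 hy
    exact ⟨y, (PySem.Set.mem_ofList _ y).1 hm.1, (PySem.Set.mem_ofList _ y).1 hm.2⟩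
  · rintro ⟨x, hx, hxl⟩
    exact List.ne_nil_of_mem ((PySem.Set.mem_inter _ _ x).2
      ⟨(PySem.Set.mem_ofList _ x).2 hx, (PySem.Set.mem_ofList _ x).2 hxl⟩)


theorem pv_B_eq_chain (keywords : List String) (cats0 : List (List String × String)) (fb : String) :
    (match keywords.foldl
        (fun best k =>
          match ((PySem.List.enumerate cats0 0).foldl
              (fun d p => p.2.1.foldl (fun d kw => d.setdefault kw p.1) d)
              PySem.Dict.empty).get? (PySem.Str.replace (PySem.Str.lower k) " " "_") with
          | some r => match best with
                      | none => some r
                      | some b => if r < b then some r else some b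
          | none => best) none with
     | none => fb
     | some b => (PySem.List.pyGetD cats0 b ([], "")).2)
    = pvChain keywords cats0 fb := by
  have hb : (fun (best : Option Int) (k : String) =>
      match ((PySem.List.enumerate cats0 0).foldl
          (fun d p => p.2.1.foldl (fun d kw => d.setdefault kw p.1) d)
          PySem.Dict.empty).get? (PySem.Str.replace (PySem.Str.lower k) " " "_") with
      | some r => match best with
                  | none => some r
                  | some b => if r < b then some r else some b
      | none => best)
      = pvStep (fun k =>
          Option.map Int.ofNat (List.findIdx? (fun c => c.1.contains (pvNrm k)) cats0)) := by
    funext acc k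
    rw [pv_get?_rank]
    simp only [PySem.Dict.contains_empty, Bool.false_eq_true, if_false, zero_add, pvStep, pvNrm]
  rw [hb, pv_minexchange cats0 keywords]
  exact pv_match_chain keywords cats0 fb


theorem pv_exists_map (f : String → String) (ks l : List String) :
    (∃ x ∈ List.map f ks, x ∈ l) ↔ ∃ k ∈ ks, f k ∈ l := by
  constructor
  · rintro ⟨x, hx, hxl⟩
    obtain ⟨k, hk, rfl⟩ := List.mem_map.1 hx
    exact ⟨k, hk, hxl⟩
  · rintro ⟨k, hk, hkl⟩
    exact ⟨f k, List.mem_map_of_mem hk, hkl⟩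

-- ===== VERDICT (by name: the statement is the Claim_ definition above) =====
theorem interpret_topic_keywords_py_spec : Claim_equal_interpret_topic_keywords_py := by
  intro keywords _
  unfold Spec_interpret_topic_keywords_py
  simp only [interpret_topic_keywords_py, interpret_topic_keywords_py_alt]
  rw [pv_B_eq_chain]
  simp only [pvChain, pv_inter_ne_nil, pv_exists_map, pvNrm]
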